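-- pv_equiv track=rewrite | github.com/clau-codrea/aoc2020 | d12/ship.py | process_instruction
-- ===== SOURCE A (Python) =====
-- CARDINAL_POINTS = ('N', 'E', 'S', 'W')
--
-- def process_instruction(instruction, initial_position, initial_orientation):
--     def process_cardinal_point(instruction):
--         if instruction[0] == 'E':
--             return 1, 0
--         elif instruction[0] == 'W':
--             return -1, 0
--         elif instruction[0] == 'N':
--             return 1, 1
--         else:
--             return -1, 1
--
--
--     def process_orientation(instruction):
--         offset = int(instruction[1]) // 90
--         if instruction[0] == 'L':
--             return -1, offset
--         else:
--             return 1, offset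
--
--
--     x, y = initial_position
--     orientation = initial_orientation
--
--     if instruction[0] in ('L', 'R'):
--         coefficient, offset = process_orientation(instruction)
--         index = CARDINAL_POINTS.index(initial_orientation)
--
--         while offset:
--             index += coefficient
--             if index == -1:
--                 index = len(CARDINAL_POINTS) - 1
--             elif index == len(CARDINAL_POINTS):
--                 index = 0
--
--             offset -= 1
--
--         orientation = CARDINAL_POINTS[index]
--     else:
--         if instruction[0] == 'F':
--             instruction = (orientation, instruction[1])
--
--         coefficient, axis = process_cardinal_point(instruction)
--         increment = coefficient * int(instruction[1])
--         if axis: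
--             y += increment
--         else:
--             x += increment
--
--     return (x, y), orientation
-- ===== SOURCE B (Python) =====
-- CARDINAL_POINTS = ('N', 'E', 'S', 'W')
-- # direction -> (dx, dy); anything not listed moves south, like the helper's final else in the original
-- MOVES = {'N': (0, 1), 'S': (0, -1), 'E': (1, 0), 'W': (-1, 0)}
--
-- def process_instruction(instruction, initial_position, initial_orientation):
--     action, value = instruction
--     x, y = initial_position
--     if action in ('L', 'R'):
--         sign = -1 if action == 'L' else 1
--         index = (CARDINAL_POINTS.index(initial_orientation) + sign * (value // 90)) % 4
--         return (x, y), CARDINAL_POINTS[index]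
--     direction = initial_orientation if action == 'F' else action
--     dx, dy = MOVES.get(direction, (0, -1))
--     return (x + dx * value, y + dy * value), initial_orientation
-- ===== Notes on version B (the rewrite author's own statement) =====
-- stated objective: idiomatic
-- what changed: Rotation is computed in closed form with (index + sign*(value//90)) % 4 instead of a step-by-step while loop with manual wraparound, and the N/S/E/W/F moves go through one direction->(dx,dy) dict lookup applied to both coordinates instead of nested if/elif helpers choosing a coefficient and an axis.
import Mathlib
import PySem

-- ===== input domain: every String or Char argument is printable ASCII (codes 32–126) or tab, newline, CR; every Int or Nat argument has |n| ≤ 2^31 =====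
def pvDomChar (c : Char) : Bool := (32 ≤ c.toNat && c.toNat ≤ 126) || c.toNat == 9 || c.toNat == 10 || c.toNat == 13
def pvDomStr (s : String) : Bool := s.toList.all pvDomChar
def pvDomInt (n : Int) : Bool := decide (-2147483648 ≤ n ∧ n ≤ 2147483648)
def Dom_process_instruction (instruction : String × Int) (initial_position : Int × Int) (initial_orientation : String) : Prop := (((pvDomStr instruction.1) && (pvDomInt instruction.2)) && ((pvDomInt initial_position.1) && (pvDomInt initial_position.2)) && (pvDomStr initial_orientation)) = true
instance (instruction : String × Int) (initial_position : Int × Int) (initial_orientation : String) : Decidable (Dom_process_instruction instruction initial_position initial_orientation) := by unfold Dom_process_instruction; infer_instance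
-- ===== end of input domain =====

-- B replaces A's step-by-step rotation loop with a closed-form (index + turn) % 4 and
-- drives all moves through one direction -> (dx,dy) lookup (more idiomatic, no speed claim).


-- ===== PORT A =====
def CARDINAL_POINTS : List String := ["N", "E", "S", "W"]

-- helper process_cardinal_point: returns (coefficient, axis)
def processCardinalPointA (s : String) : Int × Int :=
  if s = "E" then (1, 0)
  else if s = "W" then (-1, 0)
  else if s = "N" then (1, 1)
  else (-1, 1)

-- helper process_orientation: returns (coefficient, offset)
def processOrientationA (s : String) (v : Int) : Int × Int :=
  let offset := PySem.Int.floordiv v 90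
  if s = "L" then (-1, offset) else (1, offset)

-- A's while loop: runs `offset` times (fuel offset.toNat; a negative offset makes the
-- Python loop diverge, excluded by Pre_), stepping the index with manual wraparound.
def loopA : Nat → Int → Int → Int
  | 0, _, index => index
  | Nat.succ n, coefficient, index =>
      let index := index + coefficient
      let index := if index = -1 then (CARDINAL_POINTS.length : Int) - 1
                   else if index = (CARDINAL_POINTS.length : Int) then 0
                   else index
      loopA n coefficient index

def process_instruction (instruction : String × Int) (initial_position : Int × Int) (initial_orientation : String) : (Int × Int) × String :=
  let x := initial_position.1
  let y := initial_position.2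
  let orientation := initial_orientation
  if instruction.1 = "L" ∨ instruction.1 = "R" then
    let co := processOrientationA instruction.1 instruction.2
    -- CARDINAL_POINTS.index(initial_orientation); none = ValueError, excluded by Pre_
    let index : Int := ((PySem.List.index? CARDINAL_POINTS initial_orientation).getD 0 : Nat)
    let index := loopA co.2.toNat co.1 index
    let orientation := (PySem.List.pyGet? CARDINAL_POINTS index).getD ""
    ((x, y), orientation)
  else
    let instr := if instruction.1 = "F" then (orientation, instruction.2) else instruction
    let ca := processCardinalPointA instr.1
    let increment := ca.1 * instr.2
    if ca.2 ≠ 0 then ((x, y + increment), orientation)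
    else ((x + increment, y), orientation)

-- ===== PORT B =====
def MOVES : PySem.Dict String (Int × Int) :=
  PySem.Dict.ofList [("N", (0, 1)), ("S", (0, -1)), ("E", (1, 0)), ("W", (-1, 0))]

def process_instruction_alt (instruction : String × Int) (initial_position : Int × Int) (initial_orientation : String) : (Int × Int) × String :=
  let action := instruction.1
  let value := instruction.2
  let x := initial_position.1
  let y := initial_position.2
  if action = "L" ∨ action = "R" then
    let sign : Int := if action = "L" then -1 else 1
    let index := PySem.Int.mod (((PySem.List.index? CARDINAL_POINTS initial_orientation).getD 0 : Nat) + sign * PySem.Int.floordiv value 90) 4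
    ((x, y), (PySem.List.pyGet? CARDINAL_POINTS index).getD "")
  else
    let direction := if action = "F" then initial_orientation else action
    -- MOVES.get(direction, (0, -1))
    let d := (PySem.Dict.get? MOVES direction).getD (0, -1)
    ((x + d.1 * value, y + d.2 * value), initial_orientation)

-- ===== PRECONDITION & SPEC =====
-- Pre_ excludes only the rotation instructions on which the Python A does not return normally:
-- 'L'/'R' with an orientation outside CARDINAL_POINTS (tuple.index raises ValueError) or with a
-- negative amount (offset < 0 makes A's while loop diverge). Everywhere else A returns and B matches.
def Pre_process_instruction (instruction : String × Int) (initial_position : Int × Int) (initial_orientation : String) : Prop :=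
  (instruction.1 = "L" ∨ instruction.1 = "R") →
    ((initial_orientation = "N" ∨ initial_orientation = "E" ∨ initial_orientation = "S" ∨ initial_orientation = "W") ∧ 0 ≤ instruction.2)
instance (instruction : String × Int) (initial_position : Int × Int) (initial_orientation : String) : Decidable (Pre_process_instruction instruction initial_position initial_orientation) := by unfold Pre_process_instruction; infer_instance

def pvWitness_process_instruction : (String × Int) × (Int × Int) × String := (("L", 270), (3, -4), "E")

def Spec_process_instruction (instruction : String × Int) (initial_position : Int × Int) (initial_orientation : String) (out : (Int × Int) × String) : Prop := out = process_instruction_alt instruction initial_position initial_orientation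
instance (instruction : String × Int) (initial_position : Int × Int) (initial_orientation : String) (out : (Int × Int) × String) : Decidable (Spec_process_instruction instruction initial_position initial_orientation out) := by unfold Spec_process_instruction; infer_instance

-- ===== CLAIM (what is proved, stated in full; the proofs are below) =====
def Claim_equal_process_instruction : Prop := ∀ (instruction : String × Int) (initial_position : Int × Int) (initial_orientation : String), Dom_process_instruction instruction initial_position initial_orientation → Pre_process_instruction instruction initial_position initial_orientation → Spec_process_instruction instruction initial_position initial_orientation (process_instruction instruction initial_position initial_orientation)

-- ===== LEMMAS AND PROOFS =====

-- A's wrapped walk equals the closed-form modulus: one step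
theorem loopA_step_emod (c i : Int) (hc : c = 1 ∨ c = -1) (hi : 0 ≤ i ∧ i < 4) :
    (let j := i + c
     if j = -1 then (CARDINAL_POINTS.length : Int) - 1
     else if j = (CARDINAL_POINTS.length : Int) then 0 else j) = (i + c) % 4 := by
  norm_num [CARDINAL_POINTS]
  rcases hc with rfl | rfl <;> split_ifs <;> omega

theorem loopA_emod (n : Nat) (c : Int) (hc : c = 1 ∨ c = -1) :
    ∀ i : Int, 0 ≤ i → i < 4 → loopA n c i = (i + c * n) % 4 := by
  induction n with
  | zero => intro i h0 h4; simp [loopA]; omega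
  | succ m ih =>
      intro i h0 h4
      rw [loopA]
      have hstep := loopA_step_emod c i hc ⟨h0, h4⟩
      simp only at hstep
      rw [hstep]
      have hb : (0:Int) ≤ (i + c) % 4 ∧ (i + c) % 4 < 4 :=
        ⟨Int.emod_nonneg _ (by norm_num), Int.emod_lt_of_pos _ (by norm_num)⟩
      rw [ih _ hb.1 hb.2]
      rcases hc with rfl | rfl <;> push_cast <;> omega

theorem keyL (w st : Int) (hw : 0 ≤ w) (h0 : 0 ≤ st) (h4 : st < 4) :
    loopA w.toNat (-1) st = (st + -w) % 4 := by
  rw [loopA_emod _ _ (Or.inr rfl) st h0 h4, Int.toNat_of_nonneg hw]; omega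

theorem keyR (w st : Int) (hw : 0 ≤ w) (h0 : 0 ≤ st) (h4 : st < 4) :
    loopA w.toNat 1 st = (st + w) % 4 := by
  rw [loopA_emod _ _ (Or.inl rfl) st h0 h4, Int.toNat_of_nonneg hw]; omega

-- the move branch: A's (coefficient, axis) helper equals B's (dx, dy) lookup, for ANY direction string
theorem move_eq (s : String) (x y v : Int) :
    (if (processCardinalPointA s).2 ≠ 0 then (x, y + (processCardinalPointA s).1 * v)
     else (x + (processCardinalPointA s).1 * v, y)) =
    (x + ((PySem.Dict.get? MOVES s).getD (0, -1)).1 * v,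
     y + ((PySem.Dict.get? MOVES s).getD (0, -1)).2 * v) := by
  by_cases hE : s = "E"
  · subst hE
    simp [processCardinalPointA, (by decide : PySem.Dict.get? MOVES "E" = some ((1:Int),(0:Int)))]
  by_cases hW : s = "W"
  · subst hW
    simp [processCardinalPointA, hE, (by decide : PySem.Dict.get? MOVES "W" = some ((-1:Int),(0:Int)))]
  by_cases hN : s = "N"
  · subst hN
    simp [processCardinalPointA, (by decide : PySem.Dict.get? MOVES "N" = some ((0:Int),(1:Int)))]
  · have hd : (PySem.Dict.get? MOVES s).getD (0, -1) = ((0:Int), (-1:Int)) := by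
      by_cases hS : s = "S"
      · subst hS
        simp [(by decide : PySem.Dict.get? MOVES "S" = some ((0:Int),(-1:Int)))]
      · have hnone : PySem.Dict.get? MOVES s = none := by
          have h1 : (("N" : String) == s) = false := beq_eq_false_iff_ne.mpr (fun h => hN h.symm)
          have h2 : (("S" : String) == s) = false := beq_eq_false_iff_ne.mpr (fun h => hS h.symm)
          have h3 : (("E" : String) == s) = false := beq_eq_false_iff_ne.mpr (fun h => hE h.symm)
          have h4 : (("W" : String) == s) = false := beq_eq_false_iff_ne.mpr (fun h => hW h.symm)
          simp [MOVES, PySem.Dict.get?, PySem.Dict.ofList, PySem.Dict.empty, PySem.Dict.update,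
            PySem.Dict.insert, List.find?, h1, h2, h3, h4]
        rw [hnone]; rfl
    simp [processCardinalPointA, hE, hW, hN, hd]

theorem process_instruction_spec : Claim_equal_process_instruction := by
  rintro ⟨a, v⟩ ⟨px, py⟩ o _ hpre
  unfold Spec_process_instruction
  have iN : (List.idxOf? "N" ["N", "E", "S", "W"]).getD 0 = 0 := by decide
  have iE : (List.idxOf? "E" ["N", "E", "S", "W"]).getD 0 = 1 := by decide
  have iS : (List.idxOf? "S" ["N", "E", "S", "W"]).getD 0 = 2 := by decide
  have iW : (List.idxOf? "W" ["N", "E", "S", "W"]).getD 0 = 3 := by decide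
  by_cases hL : a = "L"
  · subst hL
    obtain ⟨hor, hv⟩ := hpre (Or.inl rfl)
    have hw : 0 ≤ v / 90 := Int.ediv_nonneg hv (by norm_num)
    have key := fun (st : Int) (h0 : 0 ≤ st) (h4 : st < 4) => keyL (v / 90) st hw h0 h4
    rcases hor with ho | ho | ho | ho <;> subst ho <;>
      simp [process_instruction, process_instruction_alt, processOrientationA, CARDINAL_POINTS,
        iN, iE, iS, iW, key 0 (by norm_num) (by norm_num), key 1 (by norm_num) (by norm_num),
        key 2 (by norm_num) (by norm_num), key 3 (by norm_num) (by norm_num)]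
  by_cases hR : a = "R"
  · subst hR
    obtain ⟨hor, hv⟩ := hpre (Or.inr rfl)
    have hw : 0 ≤ v / 90 := Int.ediv_nonneg hv (by norm_num)
    have key := fun (st : Int) (h0 : 0 ≤ st) (h4 : st < 4) => keyR (v / 90) st hw h0 h4
    rcases hor with ho | ho | ho | ho <;> subst ho <;>
      simp [process_instruction, process_instruction_alt, processOrientationA, CARDINAL_POINTS,
        iN, iE, iS, iW, key 0 (by norm_num) (by norm_num), key 1 (by norm_num) (by norm_num),
        key 2 (by norm_num) (by norm_num), key 3 (by norm_num) (by norm_num)]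
  · have hLR : ¬(a = "L" ∨ a = "R") := by simp [hL, hR]
    by_cases hF : a = "F"
    · subst hF
      have hmv := move_eq o px py v
      simp [process_instruction, process_instruction_alt]
      split_ifs at hmv ⊢ <;> simp_all
    · have hmv := move_eq a px py v
      simp [process_instruction, process_instruction_alt, hLR, hF]
      split_ifs at hmv ⊢ <;> simp_all
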